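-- pv_equiv track=rewrite | github.com/yana-svirhunenko/Brochure-generator | text_functions.py | wrap_into_lines
-- ===== SOURCE A (Python) =====
-- def wrap_into_lines(text, lines):
--     """
--         This function wraps text into given number of lines, so that each line is exactly the
--         same characters long with respect to the remainder
--     """
--
--     segments = []
--     text_length = len(text)
--     segment_length = text_length // lines
--     remainder = text_length % lines
--     start = 0
--
--     for _ in range(0, lines):
--         end = start + segment_length + (1 if remainder > 0 else 0)
--         segments.append(text[start:end])
--         start = end
--         remainder -= 1
--
--     return segments
-- ===== SOURCE B (Python) =====
-- def wrap_into_lines(text, lines):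
--     q, r = divmod(len(text), lines)
--     return [text[i * q + min(i, r): (i + 1) * q + min(i + 1, r)] for i in range(lines)]
-- ===== Notes on version B (the rewrite author's own statement) =====
-- stated objective: simpler
-- what changed: Replaces A's loop that threads a running start offset and a decremented remainder through lines iterations by a single comprehension computing each segment's bounds in closed form as i*q + min(i, r) from one divmod.
import Mathlib
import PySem

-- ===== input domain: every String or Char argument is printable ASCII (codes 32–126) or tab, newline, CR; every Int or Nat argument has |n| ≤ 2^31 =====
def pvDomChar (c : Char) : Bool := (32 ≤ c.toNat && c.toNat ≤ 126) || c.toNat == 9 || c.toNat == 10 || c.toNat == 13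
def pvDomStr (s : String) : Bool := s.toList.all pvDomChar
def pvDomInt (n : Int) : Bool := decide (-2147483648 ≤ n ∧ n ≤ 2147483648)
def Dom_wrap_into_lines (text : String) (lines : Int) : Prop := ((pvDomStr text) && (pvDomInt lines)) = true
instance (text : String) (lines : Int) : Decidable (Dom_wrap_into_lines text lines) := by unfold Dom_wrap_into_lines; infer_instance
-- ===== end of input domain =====

-- B replaces A's running start/remainder loop state by closed-form slice bounds i*q+min(i,r); objective: simpler.


-- ===== PORT A =====
def wrap_into_lines (text : String) (lines : Int) : List String :=
  let cs := text.toList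
  let text_length : Int := (cs.length : Int)
  let segment_length := PySem.Int.floordiv text_length lines
  let remainder := PySem.Int.mod text_length lines
  ((PySem.List.pyRange 0 lines).foldl
    (fun (st : List String × Int × Int) _ =>
      let e := st.2.1 + segment_length + (if st.2.2 > 0 then 1 else 0)
      (st.1 ++ [String.mk (PySem.List.slice cs (some st.2.1) (some e))], e, st.2.2 - 1))
    ([], 0, remainder)).1

-- ===== PORT B =====
def wrap_into_lines_alt (text : String) (lines : Int) : List String :=
  let cs := text.toList
  let q := PySem.Int.floordiv (cs.length : Int) lines
  let r := PySem.Int.mod (cs.length : Int) lines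
  (PySem.List.pyRange 0 lines).map
    (fun i => String.mk (PySem.List.slice cs (some (i * q + min i r)) (some ((i + 1) * q + min (i + 1) r))))

-- ===== PRECONDITION & SPEC =====
-- Pre_ excludes lines = 0, where both Pythons raise ZeroDivisionError.
def Pre_wrap_into_lines (text : String) (lines : Int) : Prop := lines ≠ 0
instance (text : String) (lines : Int) : Decidable (Pre_wrap_into_lines text lines) := by unfold Pre_wrap_into_lines; infer_instance
def pvWitness_wrap_into_lines : String × Int := ("hello world", 3)

def Spec_wrap_into_lines (text : String) (lines : Int) (out : List String) : Prop := out = wrap_into_lines_alt text lines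
instance (text : String) (lines : Int) (out : List String) : Decidable (Spec_wrap_into_lines text lines out) := by unfold Spec_wrap_into_lines; infer_instance

-- ===== CLAIM (what is proved, stated in full; the proofs are below) =====
def Claim_equal_wrap_into_lines : Prop := ∀ (text : String) (lines : Int), Dom_wrap_into_lines text lines → Pre_wrap_into_lines text lines → Spec_wrap_into_lines text lines (wrap_into_lines text lines)

-- ===== LEMMAS AND PROOFS =====

-- closed form for A's loop state after n iterations: start = n*q + min n r, remainder = r - n
lemma wil_loopA (cs : List Char) (q r : Int) (hr : 0 ≤ r) : ∀ n : Nat,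
    ((List.range n).map (fun k : Nat => (k : Int))).foldl
      (fun (st : List String × Int × Int) _ =>
        (st.1 ++ [String.mk (PySem.List.slice cs (some st.2.1)
            (some (st.2.1 + q + if st.2.2 > 0 then 1 else 0)))],
         st.2.1 + q + (if st.2.2 > 0 then 1 else 0), st.2.2 - 1))
      ([], 0, r)
    = ((List.range n).map (fun k : Nat =>
        String.mk (PySem.List.slice cs (some ((k : Int) * q + min (k : Int) r))
          (some (((k : Int) + 1) * q + min ((k : Int) + 1) r)))),
       (n : Int) * q + min (n : Int) r, r - (n : Int)) := by
  intro n
  induction n with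
  | zero => simp [min_eq_left hr]
  | succ n ih =>
    have hq : ((n : Int) + 1) * q = (n : Int) * q + q := by ring
    have he : (n : Int) * q + min (n : Int) r + q + (if r - (n : Int) > 0 then (1:Int) else 0)
        = ((n : Int) + 1) * q + min ((n : Int) + 1) r := by
      rw [hq]
      generalize (n : Int) * q = m
      split_ifs <;> omega
    rw [List.range_succ]
    simp only [List.map_append, List.foldl_append, ih, List.map_cons,
      List.map_nil, List.foldl_cons, List.foldl_nil]
    push_cast
    rw [he]
    simp only [Prod.mk.injEq]
    exact ⟨trivial, trivial, by ring⟩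

-- ===== VERDICT (by name: the statement is the Claim_ definition above) =====
theorem wrap_into_lines_spec : Claim_equal_wrap_into_lines := by
  intro text lines _ hpre
  unfold Spec_wrap_into_lines wrap_into_lines wrap_into_lines_alt
  dsimp only
  rcases lt_or_gt_of_ne hpre with hneg | hpos
  · have hempty : PySem.List.pyRange 0 lines = [] := by
      rw [List.eq_nil_iff_forall_not_mem]
      intro m hm
      have := (PySem.List.mem_pyRange_one).mp hm
      omega
    simp [hempty]
  · obtain ⟨n, rfl⟩ : ∃ n : Nat, lines = (n : Int) := ⟨lines.toNat, (Int.toNat_of_nonneg hpos.le).symm⟩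
    rw [PySem.List.pyRange_zero_natCast, wil_loopA _ _ _ (PySem.Int.mod_nonneg _ hpos)]
    simp [List.map_map]
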